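-- pv_equiv track=rewrite | github.com/MSWon/Algorithm_practice_python | Problem_6.py | solution
-- ===== SOURCE A (Python) =====
-- def solution(N, t, M):
--
--     M.sort(reverse = True)
--     p = [0]
--
--     for i in range(1,N):
--
--         tmp = p[i-1] + (M[i-1]-M[i])*i
--         p.append(tmp)
--         if(tmp > t):
--             break
--
--     answer = (sum(M[0:i]) - t) // i
--     return answer
-- ===== SOURCE B (Python) =====
-- def solution(N, t, M):
--     # Leveling cost cost(i) = P[i] - i*W[i] is nondecreasing in i on the
--     # descending-sorted list, so the first break index can be binary-searched.
--     W = sorted(M, reverse=True)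
--     P = [0]
--     for w in W:
--         P.append(P[-1] + w)
--     hi = min(N - 1, len(W) - 1)
--     lo, r = 1, hi + 1
--     while lo < r:
--         mid = (lo + r) // 2
--         if P[mid] - mid * W[mid] > t:
--             r = mid
--         else:
--             lo = mid + 1
--     i = lo if lo <= hi else N - 1
--     return (P[i] - t) // i
-- ===== Notes on version B (the rewrite author's own statement) =====
-- stated objective: alternative
-- what changed: B builds a prefix-sum table once and BINARY-SEARCHES for the first break index (the leveling cost P[i]-i*W[i] is nondecreasing on the descending-sorted list), replacing A's incremental accumulator and linear scan-with-break; B also uses sorted() instead of A's in-place M.sort().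
import Mathlib
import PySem

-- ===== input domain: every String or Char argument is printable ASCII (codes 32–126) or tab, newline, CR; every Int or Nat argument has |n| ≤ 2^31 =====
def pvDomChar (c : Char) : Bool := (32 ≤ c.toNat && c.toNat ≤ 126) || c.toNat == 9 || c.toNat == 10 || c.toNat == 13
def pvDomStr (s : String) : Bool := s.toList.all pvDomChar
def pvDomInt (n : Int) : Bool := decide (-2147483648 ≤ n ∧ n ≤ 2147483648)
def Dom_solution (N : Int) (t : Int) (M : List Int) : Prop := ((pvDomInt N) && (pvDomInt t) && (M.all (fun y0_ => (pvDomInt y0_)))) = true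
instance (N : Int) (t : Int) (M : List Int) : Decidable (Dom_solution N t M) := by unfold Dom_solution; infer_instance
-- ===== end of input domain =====

-- B replaces A's incremental linear scan with binary search for the break index over a
-- prefix-sum table (the leveling cost is nondecreasing on the descending-sorted list);
-- A sorts M in place, B leaves M unmutated — equivalence is about the return value only.

-- ===== PORT A =====
-- 'for i in range(1,N): tmp = p[i-1] + (M[i-1]-M[i])*i; p.append(tmp); if tmp > t: break'
-- as a counting loop; returns the leaked value of i (iLast = previous i, N-1 at completion).
-- An out-of-range index is Python's IndexError: the port returns junk 0 there, exactly the
-- inputs Pre_ excludes.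
def solutionLoopA (Ms : List Int) (t N : Int) (p : List Int) (i iLast : Int) : Int :=
  if _h : i < N then
    match PySem.List.pyGet? p (i - 1), PySem.List.pyGet? Ms (i - 1), PySem.List.pyGet? Ms i with
    | some pv, some a, some b =>
      let tmp := pv + (a - b) * i
      if tmp > t then i else solutionLoopA Ms t N (p ++ [tmp]) (i + 1) i
    | _, _, _ => 0  -- IndexError in Python (only outside Pre_)
  else iLast
termination_by (N - i).toNat
decreasing_by omega

def solution (N : Int) (t : Int) (M : List Int) : Int :=
  let Ms := PySem.List.sorted M (fun x => x) true
  let i := solutionLoopA Ms t N [0] 1 0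
  PySem.Int.floordiv ((PySem.List.slice Ms (some 0) (some i)).sum - t) i

-- ===== PORT B =====
-- 'while lo < r: mid = (lo+r)//2; if P[mid]-mid*W[mid] > t: r = mid else: lo = mid+1';
-- every mid probed lies in [1, hi] ⊆ [1, len(W)-1], where P[mid]/W[mid] are in range, so
-- pyGetD is exact here
def solutionBsearchB (P W : List Int) (t : Int) (lo r : Int) : Int :=
  if _h : lo < r then
    let mid := PySem.Int.floordiv (lo + r) 2
    if PySem.List.pyGetD P mid 0 - mid * PySem.List.pyGetD W mid 0 > t then
      solutionBsearchB P W t lo mid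
    else
      solutionBsearchB P W t (mid + 1) r
  else lo
termination_by (r - lo).toNat
decreasing_by
  · have h2 := (PySem.Int.floordiv_lt_iff_lt_mul (a := lo + r) (b := 2) (q := r) (by omega)).mpr (by omega)
    omega
  · have h1 := (PySem.Int.floordiv_two_mid_bounds (le_of_lt _h)).1
    omega

def solution_alt (N : Int) (t : Int) (M : List Int) : Int :=
  let W := PySem.List.sorted M (fun x => x) true
  let P := W.foldl (fun P w => P ++ [PySem.List.pyGetD P (-1) 0 + w]) [0]
  let hi := min (N - 1) ((W.length : Int) - 1)
  let lo := solutionBsearchB P W t 1 (hi + 1)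
  let i := if lo ≤ hi then lo else N - 1
  -- P[i]: in range on every input Pre_ admits; out of range it is Python's IndexError
  PySem.Int.floordiv (PySem.List.pyGetD P i 0 - t) i

-- ===== PRECONDITION & SPEC =====
-- the leveling cost of the top k weights of the sorted list (used by Pre_ and the proofs)
def pvCost (W : List Int) (k : Nat) : Int := (W.take k).sum - (k : Int) * W.getD k 0

-- Pre_ holds exactly where A returns: it excludes N ≤ 1 (A raises NameError: the loop never
-- runs, so i is unbound in 'sum(M[0:i])') and the inputs with N > len(M) on which the loop
-- reaches index len(M) without breaking (A raises IndexError there).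
def Pre_solution (N : Int) (t : Int) (M : List Int) : Prop :=
  2 ≤ N ∧ (N ≤ (M.length : Int) ∨
    ∃ b < M.length, 1 ≤ b ∧ pvCost (PySem.List.sorted M (fun x => x) true) b > t)
instance (N : Int) (t : Int) (M : List Int) : Decidable (Pre_solution N t M) := by
  unfold Pre_solution; infer_instance

def pvWitness_solution : Int × Int × List Int := (3, 4, [1, 7, 2, 5])

def Spec_solution (N : Int) (t : Int) (M : List Int) (out : Int) : Prop := out = solution_alt N t M
instance (N : Int) (t : Int) (M : List Int) (out : Int) : Decidable (Spec_solution N t M out) := by unfold Spec_solution; infer_instance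

-- ===== CLAIM (what is proved, stated in full; the proofs are below) =====
def Claim_equal_solution : Prop := ∀ (N : Int) (t : Int) (M : List Int), Dom_solution N t M → Pre_solution N t M → Spec_solution N t M (solution N t M)

-- ===== LEMMAS AND PROOFS =====

-- first index k in [j, hi] with pvCost W k > t (the break index both programs search for)
def pvFirst (W : List Int) (t : Int) (j hi : Nat) : Option Nat :=
  if _h : j ≤ hi then
    if pvCost W j > t then some j else pvFirst W t (j + 1) hi
  else none
termination_by hi + 1 - j

theorem pvFirst_some_fuel (W : List Int) (t : Int) :
    ∀ d j hi k, hi + 1 - j ≤ d → pvFirst W t j hi = some k →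
      j ≤ k ∧ k ≤ hi ∧ pvCost W k > t ∧ ∀ m, j ≤ m → m < k → ¬ pvCost W m > t := by
  intro d
  induction d with
  | zero =>
    intro j hi k hd h
    rw [pvFirst, dif_neg (by omega : ¬ j ≤ hi)] at h
    exact absurd h (by simp)
  | succ d ihd =>
    intro j hi k hd h
    by_cases hj : j ≤ hi
    · rw [pvFirst, dif_pos hj] at h
      by_cases hc : pvCost W j > t
      · rw [if_pos hc] at h
        obtain rfl : j = k := by simpa using h
        exact ⟨le_refl j, hj, hc, by omega⟩
      · rw [if_neg hc] at h
        obtain ⟨h1, h2, h3, h4⟩ := ihd (j + 1) hi k (by omega) h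
        refine ⟨by omega, h2, h3, ?_⟩
        intro m hm hmk
        rcases Nat.eq_or_lt_of_le hm with rfl | h
        · exact hc
        · exact h4 m (by omega) hmk
    · rw [pvFirst, dif_neg hj] at h
      exact absurd h (by simp)

theorem pvFirst_some (W : List Int) (t : Int) (j hi k : Nat) (h : pvFirst W t j hi = some k) :
    j ≤ k ∧ k ≤ hi ∧ pvCost W k > t ∧ ∀ m, j ≤ m → m < k → ¬ pvCost W m > t :=
  pvFirst_some_fuel W t (hi + 1 - j) j hi k (le_refl _) h

theorem pvFirst_none_fuel (W : List Int) (t : Int) :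
    ∀ d j hi, hi + 1 - j ≤ d → pvFirst W t j hi = none →
      ∀ m, j ≤ m → m ≤ hi → ¬ pvCost W m > t := by
  intro d
  induction d with
  | zero => intro j hi hd h m hm hmhi; omega
  | succ d ihd =>
    intro j hi hd h m hm hmhi
    have hj : j ≤ hi := by omega
    rw [pvFirst, dif_pos hj] at h
    by_cases hc : pvCost W j > t
    · rw [if_pos hc] at h; exact absurd h (by simp)
    · rw [if_neg hc] at h
      rcases Nat.eq_or_lt_of_le hm with rfl | hlt
      · exact hc
      · exact ihd (j + 1) hi (by omega) h m (by omega) hmhi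

theorem pvFirst_none (W : List Int) (t : Int) (j hi : Nat) (h : pvFirst W t j hi = none) :
    ∀ m, j ≤ m → m ≤ hi → ¬ pvCost W m > t :=
  pvFirst_none_fuel W t (hi + 1 - j) j hi (le_refl _) h

-- one leveling step: cost grows by (W[m] - W[m+1]) * (m+1)
theorem pv_step (W : List Int) (m : Nat) (hm : m + 1 < W.length) :
    pvCost W m + (W.getD m 0 - W.getD (m + 1) 0) * ((m : Int) + 1) = pvCost W (m + 1) := by
  have hm' : m < W.length := by omega
  unfold pvCost
  rw [List.getD_eq_getElem W 0 hm', List.getD_eq_getElem W 0 hm,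
    List.sum_take_succ W m hm']
  push_cast
  ring

theorem pv_getW (W : List Int) (m : Nat) (hm : m < W.length) :
    PySem.List.pyGet? W ((m : Nat) : Int) = some (W.getD m 0) := by
  rw [PySem.List.pyGet?_natCast, List.getD_eq_getElem W 0 hm]
  exact List.getElem?_eq_getElem hm

-- on a descending-sorted list the leveling cost is nondecreasing
theorem pv_mono (W : List Int) (hp : W.Pairwise (fun a b => b ≤ a)) :
    ∀ i j : Nat, i ≤ j → j < W.length → pvCost W i ≤ pvCost W j := by
  intro i j hij hj
  induction j with
  | zero => simp_all
  | succ m ihm =>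
    rcases Nat.lt_or_ge i (m + 1) with h | h
    · have h1 : pvCost W i ≤ pvCost W m := ihm (by omega) (by omega)
      have hWm : W.getD (m + 1) 0 ≤ W.getD m 0 := by
        rw [List.getD_eq_getElem W 0 (by omega : m < W.length),
          List.getD_eq_getElem W 0 hj]
        exact List.pairwise_iff_getElem.mp hp m (m + 1) (by omega) hj (by omega)
      have := pv_step W m hj
      nlinarith
    · have : i = m + 1 := by omega
      simp [this]

-- A's loop from index j equals the first-break search (under the no-IndexError hypothesis)
theorem pv_loopA (W : List Int) (t N : Int) (hiN : Nat)
    (hhi : (hiN : Int) = min (N - 1) ((W.length : Int) - 1)) :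
    ∀ (d j : Nat) (p : List Int), 1 ≤ j → (j : Int) ≤ N → (j : Int) + d = N →
      p.length = j → PySem.List.pyGet? p ((j : Int) - 1) = some (pvCost W (j - 1)) →
      (pvFirst W t j hiN = none → N ≤ (W.length : Int)) →
      solutionLoopA W t N p (j : Int) ((j : Int) - 1)
        = match pvFirst W t j hiN with | some k => (k : Int) | none => N - 1 := by
  intro d
  induction d with
  | zero =>
    intro j p hj hjN hjd hplen hpv hH
    have hjN' : ¬ ((j : Int) < N) := by omega
    have hnone : pvFirst W t j hiN = none := by
      rw [pvFirst, dif_neg (by omega : ¬ j ≤ hiN)]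
    rw [solutionLoopA, dif_neg hjN', hnone]
    show (j : Int) - 1 = N - 1
    omega
  | succ d ih =>
    intro j p hj hjN hjd hplen hpv hH
    have hjlt : (j : Int) < N := by omega
    -- j is inside the search range: otherwise the loop would run off the list,
    -- which hH rules out
    have hjhi : j ≤ hiN := by
      by_contra hgt
      have hnone : pvFirst W t j hiN = none := by
        rw [pvFirst, dif_neg (by omega : ¬ j ≤ hiN)]
      have := hH hnone
      omega
    have hjW : j < W.length := by omega
    have hj1W : j - 1 < W.length := by omega
    have hWj1 : PySem.List.pyGet? W ((j : Int) - 1) = some (W.getD (j - 1) 0) := by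
      rw [show (j : Int) - 1 = ((j - 1 : Nat) : Int) by omega]
      exact pv_getW W (j - 1) hj1W
    have hWj : PySem.List.pyGet? W (j : Int) = some (W.getD j 0) := pv_getW W j hjW
    have hm : (j - 1) + 1 = j := by omega
    have hstep := pv_step W (j - 1) (by omega)
    rw [hm] at hstep
    rw [show ((j - 1 : Nat) : Int) + 1 = (j : Int) by omega] at hstep
    rw [solutionLoopA, dif_pos hjlt, hpv, hWj1, hWj]
    simp only [hstep]
    rw [pvFirst, dif_pos hjhi]
    by_cases hgt : pvCost W j > t
    · simp only [if_pos hgt]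
    · simp only [if_neg hgt]
      have hlast : PySem.List.pyGet? (p ++ [pvCost W j]) (((j + 1 : Nat) : Int) - 1)
          = some (pvCost W ((j + 1) - 1)) := by
        rw [show ((j + 1 : Nat) : Int) - 1 = ((p.length : Nat) : Int) by push_cast; omega]
        simp
      have hrec := ih (j + 1) (p ++ [pvCost W j]) (by omega) (by push_cast; omega)
        (by push_cast; omega) (by simp [hplen]) hlast (by intro h; exact hH (by rw [pvFirst, dif_pos hjhi, if_neg hgt]; exact h))
      push_cast at hrec ⊢
      simpa using hrec

-- the foldl-built table P is [0] followed by the prefix sums of W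
theorem pv_pref_foldl (f : List Int → Int → List Int)
    (hf : f = fun P w => P ++ [PySem.List.pyGetD P (-1) 0 + w]) :
    ∀ (xs acc : List Int) (l : Int), PySem.List.pyGetD acc (-1) 0 = l →
      xs.foldl f acc = acc ++ (List.range xs.length).map (fun k => l + (xs.take (k + 1)).sum) := by
  intro xs
  induction xs with
  | nil => intro acc l _; simp
  | cons x xs ihx =>
    intro acc l hl
    have hstep : f acc x = acc ++ [l + x] := by simp [hf, hl]
    have hlast : PySem.List.pyGetD (acc ++ [l + x]) (-1) 0 = l + x :=
      PySem.List.pyGetD_neg_one_append_singleton acc (l + x) 0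
    calc (x :: xs).foldl f acc = xs.foldl f (acc ++ [l + x]) := by simp [hstep]
      _ = (acc ++ [l + x]) ++ (List.range xs.length).map (fun k => (l + x) + (xs.take (k + 1)).sum) :=
          ihx (acc ++ [l + x]) (l + x) hlast
      _ = acc ++ (List.range (x :: xs).length).map (fun k => l + ((x :: xs).take (k + 1)).sum) := by
          simp [List.range_succ_eq_map, Function.comp_def, add_assoc]

theorem pv_P (W : List Int) (k : Nat) (hk : k ≤ W.length) :
    PySem.List.pyGetD
      (W.foldl (fun P w => P ++ [PySem.List.pyGetD P (-1) 0 + w]) [0]) ((k : Nat) : Int) 0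
      = (W.take k).sum := by
  rw [pv_pref_foldl (fun P w => P ++ [PySem.List.pyGetD P (-1) 0 + w]) rfl W [0] 0 (by decide)]
  rw [PySem.List.pyGetD_natCast]
  cases k with
  | zero => simp
  | succ m =>
    have hm : m < W.length := by omega
    simp [List.getD_eq_getElem?_getD, hm]

-- the binary search returns the first index in [1, hi] whose cost exceeds t (hi + 1 if none)
theorem pv_bsearch (P W : List Int) (t hi : Int)
    (hcost : ∀ k : Nat, 1 ≤ k → (k : Int) ≤ hi →
      PySem.List.pyGetD P (k : Int) 0 - (k : Int) * PySem.List.pyGetD W (k : Int) 0 = pvCost W k)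
    (hmono : ∀ k k' : Nat, 1 ≤ k → k ≤ k' → (k' : Int) ≤ hi → pvCost W k > t → pvCost W k' > t) :
    ∀ (fuel : Nat) (lo r : Int), (r - lo).toNat ≤ fuel → 1 ≤ lo → lo ≤ r → r ≤ hi + 1 →
      (∀ k : Nat, 1 ≤ k → (k : Int) < lo → ¬ pvCost W k > t) →
      (r ≤ hi → pvCost W r.toNat > t) →
      ∃ lo' : Int, solutionBsearchB P W t lo r = lo' ∧ lo ≤ lo' ∧ lo' ≤ hi + 1 ∧
        (∀ k : Nat, 1 ≤ k → (k : Int) < lo' → ¬ pvCost W k > t) ∧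
        (lo' ≤ hi → pvCost W lo'.toNat > t) := by
  intro fuel
  induction fuel with
  | zero =>
    intro lo r hfuel h1 hlr hrhi hlow hhigh
    have : ¬ lo < r := by omega
    rw [solutionBsearchB, dif_neg this]
    refine ⟨lo, rfl, le_refl lo, by omega, hlow, ?_⟩
    intro h
    rw [show lo = r by omega]
    exact hhigh (by omega)
  | succ fuel ihf =>
    intro lo r hfuel h1 hlr hrhi hlow hhigh
    by_cases hlt : lo < r
    · rw [solutionBsearchB, dif_pos hlt]
      have hmid1 := (PySem.Int.floordiv_two_mid_bounds (le_of_lt hlt)).1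
      have hmid2 := (PySem.Int.floordiv_lt_iff_lt_mul (a := lo + r) (b := 2) (q := r)
        (by omega)).mpr (by omega)
      set mid := PySem.Int.floordiv (lo + r) 2 with hmiddef
      have hmidnat : ((mid.toNat : Nat) : Int) = mid := Int.toNat_of_nonneg (by omega)
      have hcmid := hcost mid.toNat (by omega) (by omega)
      rw [hmidnat] at hcmid
      by_cases hc : PySem.List.pyGetD P mid 0 - mid * PySem.List.pyGetD W mid 0 > t
      · simp only [if_pos hc]
        have hpredmid : pvCost W mid.toNat > t := by rw [hcmid] at hc; exact hc
        obtain ⟨lo', h⟩ := ihf lo mid (by omega) h1 (by omega) (by omega) hlow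
          (fun _ => hpredmid)
        exact ⟨lo', h.1, h.2.1, by omega, h.2.2.2⟩
      · simp only [if_neg hc]
        have hnpredmid : ¬ pvCost W mid.toNat > t := by rw [hcmid] at hc; exact hc
        have hlow' : ∀ k : Nat, 1 ≤ k → (k : Int) < mid + 1 → ¬ pvCost W k > t := by
          intro k hk hkm hpred
          exact hnpredmid (hmono k mid.toNat hk (by omega) (by omega) hpred)
        obtain ⟨lo', h⟩ := ihf (mid + 1) r (by omega) (by omega) (by omega) hrhi hlow' hhigh
        exact ⟨lo', h.1, by omega, h.2.2.1, h.2.2.2⟩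
    · rw [solutionBsearchB, dif_neg hlt]
      refine ⟨lo, rfl, le_refl lo, by omega, hlow, ?_⟩
      intro h
      rw [show lo = r by omega]
      exact hhigh (by omega)
  -- (unfolds of solutionBsearchB above match the recursion exactly: fuel only drives induction)

theorem solution_spec : Claim_equal_solution := by
  unfold Claim_equal_solution
  intro N t M _ hpre
  obtain ⟨hN, hcase⟩ := hpre
  unfold Spec_solution solution solution_alt
  simp only []
  set W := PySem.List.sorted M (fun x => x) true with hWdef
  set P := W.foldl (fun P w => P ++ [PySem.List.pyGetD P (-1) 0 + w]) [0] with hPdef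
  have hlenW : W.length = M.length := PySem.List.length_sorted M (fun x => x) true
  have hlen2 : 2 ≤ M.length := by rcases hcase with h | ⟨b, hb, hb1, _⟩ <;> omega
  have hp : W.Pairwise (fun a b => b ≤ a) := PySem.List.sorted_pairwise_rev M (fun x => x)
  set hi := min (N - 1) ((W.length : Int) - 1) with hhidef
  have hhi1 : 1 ≤ hi := by omega
  have hhiInt : ((hi.toNat : Nat) : Int) = hi := Int.toNat_of_nonneg (by omega)
  have hcost : ∀ k : Nat, 1 ≤ k → (k : Int) ≤ hi →
      PySem.List.pyGetD P (k : Int) 0 - (k : Int) * PySem.List.pyGetD W (k : Int) 0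
        = pvCost W k := by
    intro k hk hkhi
    have hkW : k ≤ W.length := by omega
    rw [hPdef, pv_P W k hkW, PySem.List.pyGetD_natCast, pvCost]
  have hmono : ∀ k k' : Nat, 1 ≤ k → k ≤ k' → (k' : Int) ≤ hi →
      pvCost W k > t → pvCost W k' > t := by
    intro k k' hk hkk hk'hi hpred
    have := pv_mono W hp k k' hkk (by omega)
    omega
  have hH : pvFirst W t 1 hi.toNat = none → N ≤ (W.length : Int) := by
    intro h
    rcases hcase with hc | ⟨b, hb, hb1, hbpred⟩
    · omega
    · by_contra hgt
      exact pvFirst_none W t 1 hi.toNat h b hb1 (by omega) hbpred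
  have hA := pv_loopA W t N hi.toNat (by rw [hhiInt]) (N - 1).toNat 1 [0]
    (le_refl 1) (by omega) (by omega) rfl
    (by simp [pvCost, PySem.List.pyGet?, PySem.List.pyIdx?]) hH
  norm_num at hA
  obtain ⟨lo', hBeq, hlo1, hlohi, hlow', hhigh'⟩ :=
    pv_bsearch P W t hi hcost hmono hi.toNat 1 (hi + 1) (by omega) (le_refl 1)
      (by omega) (le_refl _) (by intro k hk hklt _; omega) (fun h => absurd h (by omega))
  rcases h0 : pvFirst W t 1 hi.toNat with _ | k
  · -- no break index: both sides use i = N - 1, in range since N ≤ len(W)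
    rw [h0] at hA
    have hA' : solutionLoopA W t N [0] 1 0 = N - 1 := hA
    rw [hA', hBeq]
    have hNlen : N ≤ (W.length : Int) := hH h0
    have hnle : ¬ lo' ≤ hi := by
      intro hle
      exact pvFirst_none W t 1 hi.toNat h0 lo'.toNat (by omega) (by omega) (hhigh' hle)
    simp only [if_neg hnle]
    have hI : (((N - 1).toNat : Nat) : Int) = N - 1 := by omega
    have hsl : PySem.List.slice W (some 0) (some (N - 1)) = W.take (N - 1).toNat := by
      rw [← hI]
      simp
    have hPg : PySem.List.pyGetD P (N - 1) 0 = (W.take (N - 1).toNat).sum := by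
      rw [← hI, hPdef]
      exact pv_P W (N - 1).toNat (by omega)
    rw [hsl, hPg]
  · -- break at the first index k with cost > t: the binary search lands on the same k
    rw [h0] at hA
    have hA' : solutionLoopA W t N [0] 1 0 = (k : Int) := hA
    rw [hA', hBeq]
    obtain ⟨hk1, hkhi, hkpred, hkfirst⟩ := pvFirst_some W t 1 hi.toNat k h0
    have hklo : lo' ≤ (k : Int) := by
      by_contra hgt
      exact hlow' k hk1 (by omega) hkpred
    have hlo'hi : lo' ≤ hi := by omega
    have hplo := hhigh' hlo'hi
    have hlo'k : lo' = (k : Int) := by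
      by_contra hne
      exact hkfirst lo'.toNat (by omega) (by omega) hplo
    rw [hlo'k] at hlo'hi
    rw [hlo'k, if_pos hlo'hi]
    have hsl : PySem.List.slice W (some 0) (some (k : Int)) = W.take k := by
      simp
    have hPg : PySem.List.pyGetD P ((k : Nat) : Int) 0 = (W.take k).sum := by
      rw [hPdef]
      exact pv_P W k (by omega)
    rw [hsl, hPg]
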